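-- pv_equiv track=rewrite | github.com/hojoungjang/programming-exercises | 5430-AC/solution.py | solution
-- ===== SOURCE A (Python) =====
-- from collections import deque
--
-- def solution(fns, arr):
--     direction = 1
--     queue = deque(arr)
--
--     for fn in fns:
--         if fn == "R":
--             direction *= -1
--         elif fn == "D":
--             if not queue:
--                 return None
--             if direction == 1:
--                 queue.popleft()
--             else:
--                 queue.pop()
--
--     return list(queue) if direction == 1 else list(queue)[::-1]
-- ===== SOURCE B (Python) =====
-- def solution(fns, arr):
--     items = list(arr)
--     left, right = 0, len(items)
--     forward = True
--     for fn in fns: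
--         if fn == "R":
--             forward = not forward
--         elif fn == "D":
--             if left >= right:
--                 return None
--             if forward:
--                 left += 1
--             else:
--                 right -= 1
--     window = items[left:right]
--     return window if forward else window[::-1]
-- ===== Notes on version B (the rewrite author's own statement) =====
-- stated objective: simpler
-- what changed: Replaces the deque simulation (elements physically popped from either end) by two integer window bounds plus a direction flag; no element is moved, the result is a single final slice.
import Mathlib
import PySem

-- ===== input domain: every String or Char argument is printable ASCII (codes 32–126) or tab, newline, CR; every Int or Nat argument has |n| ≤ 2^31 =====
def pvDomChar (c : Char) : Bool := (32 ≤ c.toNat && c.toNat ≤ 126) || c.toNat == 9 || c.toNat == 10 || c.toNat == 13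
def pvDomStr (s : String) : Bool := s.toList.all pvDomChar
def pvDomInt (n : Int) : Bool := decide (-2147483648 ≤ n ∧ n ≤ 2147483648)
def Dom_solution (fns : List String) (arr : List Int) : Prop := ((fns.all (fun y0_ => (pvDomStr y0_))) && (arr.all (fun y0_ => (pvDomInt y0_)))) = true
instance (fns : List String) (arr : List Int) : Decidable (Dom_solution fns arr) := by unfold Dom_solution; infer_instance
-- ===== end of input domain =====

-- B replaces A's deque simulation by a shrinking index window plus a direction flag
-- and a single final slice (objective: simpler; same asymptotic cost).

-- ===== PORT A =====
-- A's loop state: some (direction, queue); none = the early 'return None' already fired.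
def solutionStep (st : Option (Int × List Int)) (fn : String) : Option (Int × List Int) :=
  match st with
  | none => none
  | some (d, q) =>
    if fn = "R" then some (d * (-1), q)
    else if fn = "D" then
      if q = [] then none
      else if d = 1 then some (d, q.drop 1)      -- queue.popleft()
      else some (d, q.dropLast)                   -- queue.pop()
    else some (d, q)

def solution (fns : List String) (arr : List Int) : Option (List Int) :=
  match fns.foldl solutionStep (some (1, arr)) with
  | none => none
  | some (d, q) => if d = 1 then some q else some q.reverse

-- ===== PORT B =====
-- B's loop state: some (left, right, forward); none = early 'return None'.
-- left/right are nonnegative Python ints kept as Nat; 'right -= 1' only happens when left < right.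
def solutionAltStep (st : Option (Nat × Nat × Bool)) (fn : String) : Option (Nat × Nat × Bool) :=
  match st with
  | none => none
  | some (l, r, fwd) =>
    if fn = "R" then some (l, r, !fwd)
    else if fn = "D" then
      if l ≥ r then none
      else if fwd then some (l + 1, r, fwd)
      else some (l, r - 1, fwd)
    else some (l, r, fwd)

def solution_alt (fns : List String) (arr : List Int) : Option (List Int) :=
  match fns.foldl solutionAltStep (some (0, arr.length, true)) with
  | none => none
  | some (l, r, fwd) =>
    let window := (arr.drop l).take (r - l)       -- items[left:right]
    if fwd then some window else some window.reverse

-- ===== PRECONDITION & SPEC =====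
def Spec_solution (fns : List String) (arr : List Int) (out : Option (List Int)) : Prop := out = solution_alt fns arr
instance (fns : List String) (arr : List Int) (out : Option (List Int)) : Decidable (Spec_solution fns arr out) := by unfold Spec_solution; infer_instance

-- ===== CLAIM (what is proved, stated in full; the proofs are below) =====
def Claim_equal_solution : Prop := ∀ (fns : List String) (arr : List Int), Dom_solution fns arr → Spec_solution fns arr (solution fns arr)

-- ===== LEMMAS AND PROOFS =====

-- Relation between A's loop state and B's loop state (over the fixed original list arr).
def StRel (arr : List Int) : Option (Int × List Int) → Option (Nat × Nat × Bool) → Prop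
  | none, none => True
  | some (d, q), some (l, r, fwd) =>
      d = (if fwd then 1 else -1) ∧ q = (arr.drop l).take (r - l) ∧ l ≤ r ∧ r ≤ arr.length
  | _, _ => False

theorem stRel_step (arr : List Int) (fn : String) (sa : Option (Int × List Int))
    (sb : Option (Nat × Nat × Bool)) (h : StRel arr sa sb) :
    StRel arr (solutionStep sa fn) (solutionAltStep sb fn) := by
  match sa, sb with
  | none, none => simpa [solutionStep, solutionAltStep] using h
  | some (d, q), none => exact absurd h (by simp [StRel])
  | none, some _ => exact absurd h (by simp [StRel])
  | some (d, q), some (l, r, fwd) =>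
    obtain ⟨hd, hq, hlr, hr⟩ := h
    by_cases hR : fn = "R"
    · subst hd hq
      simp only [solutionStep, solutionAltStep, hR]
      refine ⟨?_, rfl, hlr, hr⟩
      cases fwd <;> simp
    · by_cases hD : fn = "D"
      · have hqlen : q.length = r - l := by
          subst hq; simp [List.length_take, List.length_drop]; omega
        have hqe : q = [] ↔ r ≤ l := by
          rw [← List.length_eq_zero_iff, hqlen]; omega
        simp only [solutionStep, solutionAltStep, hD, ge_iff_le]
        by_cases hempty : q = []
        · simp [hempty, hqe.mp hempty, StRel]
        · have hlt : ¬ r ≤ l := fun h' => hempty (hqe.mpr h')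
          rw [if_neg hempty, if_neg hlt]
          by_cases hfwd : fwd = true
          · have hd1 : d = 1 := by rw [hd, hfwd]; rfl
            rw [if_pos hd1, hfwd]
            refine ⟨by rw [hd, hfwd], ?_, by omega, hr⟩
            subst hq
            rw [List.drop_take]
            simp only [List.drop_drop]
            rw [Nat.sub_sub]
          · have hf : fwd = false := by revert hfwd; cases fwd <;> simp
            have hdneg : d ≠ 1 := by rw [hd, hf]; decide
            rw [if_neg hdneg, hf]
            refine ⟨by rw [hd, hf], ?_, by omega, by omega⟩
            subst hq
            rw [List.dropLast_eq_take, hqlen, List.take_take]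
            congr 1
            omega
      · simp only [solutionStep, solutionAltStep, hR, hD]
        exact ⟨hd, hq, hlr, hr⟩

theorem stRel_foldl (arr : List Int) (fns : List String) (sa : Option (Int × List Int))
    (sb : Option (Nat × Nat × Bool)) (h : StRel arr sa sb) :
    StRel arr (fns.foldl solutionStep sa) (fns.foldl solutionAltStep sb) := by
  induction fns generalizing sa sb with
  | nil => simpa using h
  | cons fn rest ih =>
    simp only [List.foldl_cons]
    exact ih _ _ (stRel_step arr fn sa sb h)

-- ===== VERDICT (by name: the statement is the Claim_ definition above) =====
theorem solution_spec : Claim_equal_solution := by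
  intro fns arr _
  unfold Spec_solution solution solution_alt
  have h0 : StRel arr (some (1, arr)) (some (0, arr.length, true)) := by
    refine ⟨rfl, by simp, Nat.zero_le _, le_refl _⟩
  have h := stRel_foldl arr fns _ _ h0
  match hA : fns.foldl solutionStep (some (1, arr)), hB : fns.foldl solutionAltStep (some (0, arr.length, true)) with
  | none, none => rfl
  | some (d, q), none => rw [hA, hB] at h; exact absurd h (by simp [StRel])
  | none, some _ => rw [hA, hB] at h; exact absurd h (by simp [StRel])
  | some (d, q), some (l, r, fwd) =>
    rw [hA, hB] at h
    obtain ⟨hd, hq, _, _⟩ := h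
    subst hd hq
    cases fwd <;> simp
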